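-- pv_equiv track=rewrite | github.com/pdrakeweb/ha-ai-expose-entities | custom_components/ai_expose_entities/utils/test_entities.py | _expand_relevant_names
-- ===== SOURCE A (Python) =====
-- RELEVANT_NAME_POOL: tuple[str, ...] = (
--     "Living Room Temperature",
--     "Kitchen Temperature",
--     "Bedroom Humidity",
--     "Bathroom Humidity",
--     "Outdoor Temperature",
--     "Garage Motion Count",
--     "Front Door Activity",
--     "Laundry Power Usage",
--     "Basement Air Quality",
--     "Office Light Level",
--     "Nursery Noise Level",
--     "Garden Soil Moisture",
--     "Main Hall Occupancy",
--     "Driveway Activity",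
--     "Water Heater Runtime",
--     "Thermostat Setpoint",
--     "Living Room CO2",
--     "Attic Heat Index",
--     "Solar Output",
--     "Pool Pump Status",
-- )
--
-- def _expand_relevant_names(count: int) -> list[str]:
--     if count <= 0:
--         return []
--     if count <= len(RELEVANT_NAME_POOL):
--         return list(RELEVANT_NAME_POOL[:count])
--
--     names = list(RELEVANT_NAME_POOL)
--     suffix = 1
--     while len(names) < count:
--         names.append(f"{RELEVANT_NAME_POOL[(suffix - 1) % len(RELEVANT_NAME_POOL)]} {suffix}")
--         suffix += 1
--     return names
-- ===== SOURCE B (Python) =====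
-- RELEVANT_NAME_POOL: tuple[str, ...] = (
--     "Living Room Temperature",
--     "Kitchen Temperature",
--     "Bedroom Humidity",
--     "Bathroom Humidity",
--     "Outdoor Temperature",
--     "Garage Motion Count",
--     "Front Door Activity",
--     "Laundry Power Usage",
--     "Basement Air Quality",
--     "Office Light Level",
--     "Nursery Noise Level",
--     "Garden Soil Moisture",
--     "Main Hall Occupancy",
--     "Driveway Activity",
--     "Water Heater Runtime",
--     "Thermostat Setpoint",
--     "Living Room CO2",
--     "Attic Heat Index",
--     "Solar Output",
--     "Pool Pump Status",
-- )
--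
-- def _expand_relevant_names(count: int) -> list[str]:
--     pool = list(RELEVANT_NAME_POOL)
--     if count <= len(pool):
--         return pool[:max(count, 0)]
--     # overproduce whole numbered cycles of the pool, then truncate
--     cycles = -(-(count - len(pool)) // len(pool))  # ceil division
--     names = pool + [
--         f"{name} {c * len(pool) + j + 1}"
--         for c in range(cycles)
--         for j, name in enumerate(pool)
--     ]
--     return names[:count]
-- ===== Notes on version B (the rewrite author's own statement) =====
-- stated objective: alternative
-- what changed: A grows the list element-by-element with a while loop and a running suffix counter; B computes the needed number of whole cycles by ceiling division, generates entire numbered copies of the pool with a nested comprehension (overproducing up to one cycle), and truncates to count with a slice.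
import Mathlib
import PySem

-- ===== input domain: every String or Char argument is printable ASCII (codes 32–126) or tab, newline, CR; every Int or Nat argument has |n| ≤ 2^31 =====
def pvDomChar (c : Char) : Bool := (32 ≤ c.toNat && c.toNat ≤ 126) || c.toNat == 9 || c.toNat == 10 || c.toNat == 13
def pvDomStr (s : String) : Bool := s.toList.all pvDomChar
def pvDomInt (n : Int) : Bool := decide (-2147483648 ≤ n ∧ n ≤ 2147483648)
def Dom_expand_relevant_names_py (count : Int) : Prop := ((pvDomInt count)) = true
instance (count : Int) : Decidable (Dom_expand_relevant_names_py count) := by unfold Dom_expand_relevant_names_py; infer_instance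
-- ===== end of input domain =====

-- B replaces A's element-by-element while-loop with a suffix counter by ceiling-division
-- cycle counting: generate whole numbered copies of the pool, then truncate (objective: alternative).

-- ===== PORT A =====
-- the module constant RELEVANT_NAME_POOL (tuple of 20 strings)
def pvPool : List String :=
  ["Living Room Temperature", "Kitchen Temperature", "Bedroom Humidity",
   "Bathroom Humidity", "Outdoor Temperature", "Garage Motion Count",
   "Front Door Activity", "Laundry Power Usage", "Basement Air Quality",
   "Office Light Level", "Nursery Noise Level", "Garden Soil Moisture",
   "Main Hall Occupancy", "Driveway Activity", "Water Heater Runtime",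
   "Thermostat Setpoint", "Living Room CO2", "Attic Heat Index",
   "Solar Output", "Pool Pump Status"]

-- the f-string appended by A's while-loop body (index (suffix-1) % len is always in [0, len), so pyGetD is exact)
def pvItemA (suffix : Int) : String :=
  PySem.List.pyGetD pvPool (PySem.Int.mod (suffix - 1) (pvPool.length : Int)) "" ++ " " ++ PySem.Int.toStr suffix

-- A's while-loop: append pvItemA suffix while len(names) < count
def pvLoopA (count : Int) (names : List String) (suffix : Int) : List String :=
  if h : (names.length : Int) < count then
    pvLoopA count (names ++ [pvItemA suffix]) (suffix + 1)
  else names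
termination_by (count - names.length).toNat
decreasing_by simp; omega

def expand_relevant_names_py (count : Int) : List String :=
  if count ≤ 0 then []
  else if count ≤ (pvPool.length : Int) then PySem.List.slice pvPool none (some count)
  else pvLoopA count pvPool 1

-- ===== PORT B =====
-- one whole numbered cycle of the pool: [f"{name} {c*len(pool)+j+1}" for j, name in enumerate(pool)]
def pvCycleB (c : Int) : List String :=
  (PySem.List.enumerate pvPool 0).map
    (fun p => p.2 ++ " " ++ PySem.Int.toStr (c * (pvPool.length : Int) + p.1 + 1))

def expand_relevant_names_py_alt (count : Int) : List String :=
  if count ≤ (pvPool.length : Int) then PySem.List.slice pvPool none (some (max count 0))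
  else
    -- cycles = -(-(count - len(pool)) // len(pool))  (ceiling division)
    let cycles : Int := -(PySem.Int.floordiv (-(count - (pvPool.length : Int))) (pvPool.length : Int))
    let names := pvPool ++ (PySem.List.pyRange 0 cycles 1).flatMap pvCycleB
    PySem.List.slice names none (some count)

-- ===== PRECONDITION & SPEC =====
def Spec_expand_relevant_names_py (count : Int) (out : List String) : Prop := out = expand_relevant_names_py_alt count
instance (count : Int) (out : List String) : Decidable (Spec_expand_relevant_names_py count out) := by unfold Spec_expand_relevant_names_py; infer_instance

-- ===== CLAIM (what is proved, stated in full; the proofs are below) =====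
def Claim_equal_expand_relevant_names_py : Prop := ∀ (count : Int), Dom_expand_relevant_names_py count → Spec_expand_relevant_names_py count (expand_relevant_names_py count)

-- ===== LEMMAS AND PROOFS =====

lemma pvPool_len : pvPool.length = 20 := rfl

-- closed form of A's while-loop
lemma pvLoopA_eq (count : Int) : ∀ (fuel : Nat) (names : List String) (suffix : Int),
    (count - names.length).toNat = fuel →
    pvLoopA count names suffix = names ++ (List.range fuel).map (fun j : Nat => pvItemA (suffix + (j : Int))) := by
  intro fuel
  induction fuel with
  | zero =>
    intro names suffix h
    rw [pvLoopA, dif_neg (by omega)]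
    simp
  | succ n ih =>
    intro names suffix h
    rw [pvLoopA, dif_pos (by omega)]
    rw [ih (names ++ [pvItemA suffix]) (suffix + 1) (by simp; omega)]
    rw [List.range_succ_eq_map, List.map_cons, List.map_map]
    simp only [Nat.cast_zero, add_zero, List.append_assoc, List.singleton_append]
    congr 2
    apply List.map_congr_left
    intro j _
    simp only [Function.comp_apply]
    congr 1
    push_cast
    ring

-- A's suffix item at suffix 1 + (k*20 + j), written with the plain pool index j
lemma pvItemA_suffix (k j : Nat) (hj : j < 20) :
    pvItemA (1 + ((k * 20 + j : Nat) : Int))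
      = pvPool.getD j "" ++ " " ++ PySem.Int.toStr (1 + ((k * 20 + j : Nat) : Int)) := by
  unfold pvItemA
  rw [show (1 : Int) + ((k * 20 + j : Nat) : Int) - 1 = ((k * 20 + j : Nat) : Int) from by push_cast; ring,
      pvPool_len, PySem.Int.mod_natCast,
      show (k * 20 + j) % 20 = j from by omega, PySem.List.pyGetD_natCast]

-- one of B's cycles, index-wise: element j of cycle k is A's suffix item 1 + (k*20 + j)
lemma pvCycleB_eq (k : Nat) :
    pvCycleB (k : Int) = (List.range 20).map (fun j : Nat => pvItemA (1 + ((k * 20 + j : Nat) : Int))) := by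
  rw [List.map_congr_left (fun j hj => pvItemA_suffix k j (List.mem_range.mp hj))]
  unfold pvCycleB
  rw [show (List.range 20) = [0,1,2,3,4,5,6,7,8,9,10,11,12,13,14,15,16,17,18,19] from by decide]
  simp only [pvPool, PySem.List.enumerate, List.map, List.length_cons, List.length_nil, List.getD,
    List.getElem?_cons_zero, List.getElem?_cons_succ, Option.getD_some]
  norm_num
  repeat' apply And.intro
  all_goals (congr 1; ring)

-- the flattened cycles are exactly the first q*20 suffix items
lemma pvFlat (q : Nat) :
    (PySem.List.pyRange 0 (q : Int) 1).flatMap pvCycleB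
      = (List.range (q * 20)).map (fun m : Nat => pvItemA (1 + (m : Int))) := by
  induction q with
  | zero => simp [PySem.List.pyRange_one_eq_nil]
  | succ n ih =>
    rw [show ((n + 1 : Nat) : Int) = (n : Int) + 1 from by push_cast; ring]
    rw [PySem.List.pyRange_one_succ_right (by omega), List.flatMap_append, ih]
    rw [show (n + 1) * 20 = n * 20 + 20 from by ring, List.range_add, List.map_append]
    simp only [List.flatMap_cons, List.flatMap_nil, List.append_nil, List.map_map]
    congr 1
    rw [pvCycleB_eq n]
    simp

-- ===== VERDICT (by name: the statement is the Claim_ definition above) =====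
theorem expand_relevant_names_py_spec : Claim_equal_expand_relevant_names_py := by
  intro count _
  unfold Spec_expand_relevant_names_py expand_relevant_names_py expand_relevant_names_py_alt
  by_cases h0 : count ≤ 0
  · rw [if_pos h0, if_pos (by rw [pvPool_len]; omega), show max count 0 = 0 from by omega,
        show (0 : Int) = ((0 : Nat) : Int) from rfl, PySem.List.slice_to_natCast]
    simp
  · rw [if_neg h0]
    by_cases h20 : count ≤ (pvPool.length : Int)
    · rw [if_pos h20, if_pos h20, show max count 0 = count from by omega]
    · rw [if_neg h20, if_neg h20]
      rw [pvPool_len] at h20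
      -- N = number of extra names A appends
      set N : Nat := (count - 20).toNat with hN
      -- q = number of whole cycles B generates
      set q : Nat := (N + 19) / 20 with hq
      have hqv : -(PySem.Int.floordiv (-(count - (pvPool.length : Int))) (pvPool.length : Int)) = (q : Int) := by
        rw [pvPool_len]
        rw [PySem.Int.neg_floordiv_neg_eq_iff_of_pos (by omega)]
        constructor <;> omega
      rw [hqv]
      show _ = PySem.List.slice (pvPool ++ (PySem.List.pyRange 0 (q : Int) 1).flatMap pvCycleB) none (some count)
      rw [pvLoopA_eq count N pvPool 1 (by rw [pvPool_len]; omega)]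
      rw [pvFlat q]
      rw [PySem.List.slice_to _ (show (0 : Int) ≤ count by omega), List.take_append]
      rw [show pvPool.length = 20 from rfl, show count.toNat - 20 = N from by omega,
          show pvPool.take count.toNat = pvPool from List.take_of_length_le (by rw [pvPool_len]; omega)]
      congr 1
      rw [← List.map_take, List.take_range, show min N (q * 20) = N from by omega]
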